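-- pv_equiv track=rewrite | github.com/peterspackman/mlip.cpp | scripts/export_pytorch/dimension_mapper.py | pytorch_to_ggml_permute
-- ===== SOURCE A (Python) =====
-- def pytorch_to_ggml_dim(dim: int, ndim: int) -> int:
--     """
--     Convert a PyTorch dimension index to GGML dimension index.
--
--     In PyTorch, dim 0 is the outermost (batch) dimension.
--     In GGML, dim 0 (ne[0]) is the innermost (contiguous) dimension.
--
--     Examples:
--         >>> pytorch_to_ggml_dim(0, 3)  # batch dim in 3D tensor
--         2
--         >>> pytorch_to_ggml_dim(2, 3)  # innermost dim in 3D tensor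
--         0
--         >>> pytorch_to_ggml_dim(-1, 3)  # last dim (feature dim)
--         0
--
--     Args:
--         dim: PyTorch dimension index (can be negative)
--         ndim: Number of dimensions in the tensor
--
--     Returns:
--         GGML dimension index
--     """
--     # Handle negative dimensions
--     if dim < 0:
--         dim = ndim + dim
--     # Reverse the dimension index
--     return ndim - 1 - dim
--
-- def pytorch_to_ggml_permute(perm: list[int] | tuple[int, ...], ndim: int) -> list[int]:
--     """
--     Convert PyTorch permute dimensions to GGML permute dimensions.
--
--     In PyTorch: permute([0, 2, 1, 3]) on shape [a, b, c, d] -> [a, c, b, d]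
--     In GGML: same logical operation needs adjusted indices
--
--     Examples:
--         >>> pytorch_to_ggml_permute([0, 2, 1], 3)  # Swap last two dims
--         [0, 2, 1]  # Same in GGML but operates on reversed shape
--         >>> pytorch_to_ggml_permute([1, 0], 2)  # Transpose 2D
--         [1, 0]
--
--     Args:
--         perm: PyTorch permutation (output dim i gets input dim perm[i])
--         ndim: Number of dimensions
--
--     Returns:
--         GGML permutation
--     """
--     # For a permutation that takes PyTorch dims and rearranges them,
--     # we need to map it to GGML's reversed dimension space.
--     #
--     # If PyTorch permute is [p0, p1, p2, p3] meaning: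
--     #   output[i] = input[perm[i]]
--     #
--     # In GGML (reversed), the equivalent permute operates on ne[] indices.
--     # GGML ne[i] corresponds to PyTorch shape[ndim-1-i]
--     #
--     # The GGML permute needs to be: for each GGML output dim j,
--     # which GGML input dim does it come from?
--
--     # Map PyTorch dims to GGML dims
--     ggml_perm = []
--     for pt_out_dim in range(ndim):
--         pt_in_dim = perm[pt_out_dim]
--         # Convert both to GGML space
--         ggml_out_dim = pytorch_to_ggml_dim(pt_out_dim, ndim)
--         ggml_in_dim = pytorch_to_ggml_dim(pt_in_dim, ndim)
--         ggml_perm.append((ggml_out_dim, ggml_in_dim))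
--
--     # Sort by output dim and extract input dims
--     ggml_perm.sort(key=lambda x: x[0])
--     return [x[1] for x in ggml_perm]
-- ===== SOURCE B (Python) =====
-- def pytorch_to_ggml_dim(dim: int, ndim: int) -> int:
--     if dim < 0:
--         dim = ndim + dim
--     return ndim - 1 - dim
--
-- def pytorch_to_ggml_permute(perm, ndim):
--     # The GGML output dims ndim-1-i are already strictly decreasing, so the
--     # sorted-by-output list is just the reversed one: read perm back-to-front.
--     return [pytorch_to_ggml_dim(perm[ndim - 1 - j], ndim) for j in range(ndim)]
-- ===== Notes on version B (the rewrite author's own statement) =====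
-- stated objective: simpler
-- what changed: Drops A's tuple-list build and sort: since the GGML output dims ndim-1-i are strictly decreasing, sorting by them just reverses the list, so B reads perm back-to-front and maps each entry through the dim-reversal formula directly.
import Mathlib
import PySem

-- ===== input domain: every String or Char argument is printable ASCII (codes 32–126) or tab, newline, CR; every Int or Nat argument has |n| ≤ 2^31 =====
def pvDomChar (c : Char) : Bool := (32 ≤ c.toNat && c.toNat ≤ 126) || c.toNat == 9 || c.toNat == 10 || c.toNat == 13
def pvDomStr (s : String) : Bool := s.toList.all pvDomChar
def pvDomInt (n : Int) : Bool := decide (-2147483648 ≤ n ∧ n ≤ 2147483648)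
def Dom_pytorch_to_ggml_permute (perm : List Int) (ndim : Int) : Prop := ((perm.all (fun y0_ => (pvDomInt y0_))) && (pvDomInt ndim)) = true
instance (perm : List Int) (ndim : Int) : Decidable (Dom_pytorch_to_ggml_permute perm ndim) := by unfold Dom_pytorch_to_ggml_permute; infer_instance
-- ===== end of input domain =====

-- B is simpler: the GGML output dims ndim-1-i are already strictly decreasing, so the
-- tuple list + sort of A collapses to reading perm back-to-front through the dim map.

-- ===== PORT A =====
-- helper pytorch_to_ggml_dim (used by both Pythons)
def pytorch_to_ggml_dim (dim : Int) (ndim : Int) : Int :=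
  if dim < 0 then ndim - 1 - (ndim + dim) else ndim - 1 - dim

-- perm[pt_out_dim] is ported with pyGetD; exact on Pre_ (index in range, no IndexError)
def pytorch_to_ggml_permute (perm : List Int) (ndim : Int) : List Int :=
  let ggml_perm := (PySem.List.pyRange 0 ndim 1).foldl
    (fun acc pt_out_dim =>
      let pt_in_dim := PySem.List.pyGetD perm pt_out_dim 0
      acc ++ [(pytorch_to_ggml_dim pt_out_dim ndim, pytorch_to_ggml_dim pt_in_dim ndim)])
    ([] : List (Int × Int))
  (PySem.List.sorted ggml_perm (fun x => x.1) false).map (fun x => x.2)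

-- ===== PORT B =====
def pytorch_to_ggml_permute_alt (perm : List Int) (ndim : Int) : List Int :=
  (PySem.List.pyRange 0 ndim 1).map
    (fun j => pytorch_to_ggml_dim (PySem.List.pyGetD perm (ndim - 1 - j) 0) ndim)

-- ===== PRECONDITION & SPEC =====
-- Pre_ excludes exactly the inputs where A raises IndexError (ndim exceeds len(perm)).
def Pre_pytorch_to_ggml_permute (perm : List Int) (ndim : Int) : Prop :=
  ndim ≤ (perm.length : Int)
instance (perm : List Int) (ndim : Int) : Decidable (Pre_pytorch_to_ggml_permute perm ndim) := by unfold Pre_pytorch_to_ggml_permute; infer_instance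
def pvWitness_pytorch_to_ggml_permute : List Int × Int := ([1, 0, 2], 3)

def Spec_pytorch_to_ggml_permute (perm : List Int) (ndim : Int) (out : List Int) : Prop := out = pytorch_to_ggml_permute_alt perm ndim
instance (perm : List Int) (ndim : Int) (out : List Int) : Decidable (Spec_pytorch_to_ggml_permute perm ndim out) := by unfold Spec_pytorch_to_ggml_permute; infer_instance

-- ===== CLAIM (what is proved, stated in full; the proofs are below) =====
def Claim_equal_pytorch_to_ggml_permute : Prop := ∀ (perm : List Int) (ndim : Int), Dom_pytorch_to_ggml_permute perm ndim → Pre_pytorch_to_ggml_permute perm ndim → Spec_pytorch_to_ggml_permute perm ndim (pytorch_to_ggml_permute perm ndim)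

-- ===== LEMMAS AND PROOFS =====

theorem pytorch_to_ggml_permute_eq (perm : List Int) (ndim : Int)
    (_hpre : ndim ≤ (perm.length : Int)) :
    pytorch_to_ggml_permute perm ndim = pytorch_to_ggml_permute_alt perm ndim := by
  unfold pytorch_to_ggml_permute pytorch_to_ggml_permute_alt
  rw [PySem.List.foldl_append_singleton_eq_map, PySem.List.pyRange_one,
    List.map_map, List.map_map]
  simp only [List.nil_append]
  have hn : ((ndim - 0).toNat : Int) = max ndim 0 := by omega
  -- sorting by the strictly decreasing output dims just reverses the list
  have hsorted :
      PySem.List.sorted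
        ((List.range (ndim - 0).toNat).map
          ((fun pt_out_dim => (pytorch_to_ggml_dim pt_out_dim ndim,
              pytorch_to_ggml_dim (PySem.List.pyGetD perm pt_out_dim 0) ndim)) ∘
            fun k => (0 : Int) + ↑k))
        (fun x => x.1) false =
      ((List.range (ndim - 0).toNat).map
          ((fun pt_out_dim => (pytorch_to_ggml_dim pt_out_dim ndim,
              pytorch_to_ggml_dim (PySem.List.pyGetD perm pt_out_dim 0) ndim)) ∘
            fun k => (0 : Int) + ↑k)).reverse := by
    apply PySem.List.sorted_eq_of_perm_of_pairwise_lt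
    · exact List.reverse_perm _
    · rw [List.pairwise_reverse, List.pairwise_map]
      refine List.pairwise_lt_range.imp ?_
      intro a b hab
      simp only [Function.comp, pytorch_to_ggml_dim]
      have ha : ¬ ((0:Int) + (a:Int) < 0) := by omega
      have hb : ¬ ((0:Int) + (b:Int) < 0) := by omega
      rw [if_neg ha, if_neg hb]
      omega
  rw [hsorted, List.map_reverse, List.map_map]
  -- the reversed map over range is the direct back-to-front read
  apply List.ext_getElem
  · simp
  · intro i h1 h2
    simp only [List.length_reverse, List.length_map, List.length_range] at h1
    rw [List.getElem_reverse]
    simp only [List.getElem_map, List.getElem_range, List.length_map, List.length_range,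
      Function.comp]
    have hidx : (0 : Int) + (((ndim - 0).toNat - 1 - i : Nat) : Int)
        = ndim - 1 - ((0 : Int) + (i : Int)) := by omega
    rw [hidx]

-- ===== VERDICT (by name: the statement is the Claim_ definition above) =====
theorem pytorch_to_ggml_permute_spec : Claim_equal_pytorch_to_ggml_permute := by
  intro perm ndim _ hpre
  unfold Spec_pytorch_to_ggml_permute
  exact pytorch_to_ggml_permute_eq perm ndim hpre
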